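-- pv_equiv track=rewrite | github.com/STABLE-TURBO/NeuralDBG | neural/parser/hpo_utils.py | extract_hpo_expressions
-- ===== SOURCE A (Python) =====
-- from typing import Any, Callable, Dict, List, Optional
--
-- def extract_hpo_expressions(text: str) -> List[str]:
--     """Extract HPO expressions from text, handling nested parentheses.
--
--     Args:
--         text: Text containing HPO expressions
--
--     Returns:
--         List of HPO expression contents (without 'HPO(' and ')')
--     """
--     results = []
--     start_idx = text.find('HPO(')
--     while start_idx != -1:
--         # Find the matching closing parenthesis
--         paren_level = 0
--         for i in range(start_idx + 4, len(text)):  # Skip 'HPO('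
--             if text[i] == '(':
--                 paren_level += 1
--             elif text[i] == ')':
--                 if paren_level == 0:
--                     # Found the matching closing parenthesis
--                     results.append(text[start_idx + 4:i])
--                     break
--                 paren_level -= 1
--         # Find the next HPO expression
--         start_idx = text.find('HPO(', start_idx + 1)
--     return results
-- ===== SOURCE B (Python) =====
-- def extract_hpo_expressions(text):
--     """Extract HPO expressions from text, handling nested parentheses.
--
--     One O(n) stack pass precomputes the matching ')' index for every '(',
--     then each 'HPO(' occurrence is a constant-time lookup.
--     """
--     match = {}
--     stack = []
--     for i, c in enumerate(text):
--         if c == '(':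
--             stack.append(i)
--         elif c == ')':
--             if stack:
--                 match[stack.pop()] = i
--     results = []
--     for i in range(len(text)):
--         if text.startswith('HPO(', i) and (i + 3) in match:
--             results.append(text[i + 4:match[i + 3]])
--     return results
-- ===== Notes on version B (the rewrite author's own statement) =====
-- stated objective: alternative
-- what changed: A rescans forward from every marker occurrence to find its matching closing parenthesis (quadratic in the worst case); B makes one stack pass over the text precomputing the matching index of every opening parenthesis into a dict, so each occurrence becomes a single lookup.
import Mathlib
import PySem

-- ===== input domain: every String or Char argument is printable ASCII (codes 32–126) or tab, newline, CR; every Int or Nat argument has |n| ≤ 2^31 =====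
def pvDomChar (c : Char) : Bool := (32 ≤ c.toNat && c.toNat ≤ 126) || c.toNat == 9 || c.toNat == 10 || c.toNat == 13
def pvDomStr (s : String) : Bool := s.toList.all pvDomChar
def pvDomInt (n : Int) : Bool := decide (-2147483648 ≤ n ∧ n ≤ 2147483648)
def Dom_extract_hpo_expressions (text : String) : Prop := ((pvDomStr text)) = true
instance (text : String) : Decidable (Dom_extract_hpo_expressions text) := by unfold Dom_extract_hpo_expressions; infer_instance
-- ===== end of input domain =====

-- B replaces A's per-occurrence rescan for the matching ')' by one stack pass that
-- precomputes every '(' match index, then a single dict lookup per 'HPO(' occurrence.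

-- ===== PORT A =====

-- text.find('HPO(', s): ported by hand over List Char (exact: left-to-right scan for the
-- 4-char literal needle, returning the absolute index of the first hit, none if absent);
-- l is the list of chars from absolute index i on.
def findHPOAux : List Char → Nat → Option Nat
  | [], _ => none
  | c :: rest, i =>
    if (c :: rest).take 4 = ['H', 'P', 'O', '('] then some i
    else findHPOAux rest (i + 1)

-- A's inner for-loop: scan l (the chars from absolute index i) for the matching ')',
-- carrying paren_level (the `lvl - 1` only fires under `lvl ≠ 0`, as in Python).
def scanClose : List Char → Nat → Nat → Option Nat
  | [], _, _ => none
  | c :: rest, i, lvl =>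
    if c = '(' then scanClose rest (i + 1) (lvl + 1)
    else if c = ')' then
      if lvl = 0 then some i else scanClose rest (i + 1) (lvl - 1)
    else scanClose rest (i + 1) lvl

-- termination helper for A's while loop (the next find position is strictly larger)
theorem findHPOAux_bounds : ∀ (l : List Char) (i p : Nat),
    findHPOAux l i = some p → i ≤ p ∧ p + 4 ≤ i + l.length := by
  intro l
  induction l with
  | nil => intro i p h; simp [findHPOAux] at h
  | cons c rest ih =>
    intro i p h
    unfold findHPOAux at h
    split at h
    · rename_i htake
      have hlen : ((c :: rest).take 4).length = 4 := by rw [htake]; rfl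
      rw [List.length_take] at hlen
      cases h
      omega
    · have := ih (i + 1) p h
      simp at this ⊢
      omega

-- A's while loop: handle the occurrence found at p, then search again from p+1.
-- The slice text[p+4:j] is (cs.drop (p+4)).take (j-(p+4)) (0 ≤ p+4 ≤ j ≤ len here).
def aLoop (cs : List Char) (s : Nat) : List String :=
  match h : findHPOAux (cs.drop s) s with
  | none => []
  | some p =>
    match scanClose (cs.drop (p + 4)) (p + 4) 0 with
    | none => aLoop cs (p + 1)
    | some j =>
      String.ofList ((cs.drop (p + 4)).take (j - (p + 4))) :: aLoop cs (p + 1)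
termination_by cs.length - s
decreasing_by
  all_goals
    have hb := findHPOAux_bounds _ _ _ h
    rw [List.length_drop] at hb
    omega

def extract_hpo_expressions (text : String) : List String :=
  aLoop text.toList 0

-- ===== PORT B =====

-- B's first pass: for i, c in enumerate(text) with a stack of open-'(' indices and a
-- dict mapping each matched '(' index to its ')' index.
def buildAux : List Char → Nat → List Nat → PySem.Dict Nat Nat →
    List Nat × PySem.Dict Nat Nat
  | [], _, st, m => (st, m)
  | c :: rest, i, st, m =>
    if c = '(' then buildAux rest (i + 1) (i :: st) m
    else if c = ')' then
      match st with
      | [] => buildAux rest (i + 1) [] m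
      | q :: st' => buildAux rest (i + 1) st' (m.insert q i)
    else buildAux rest (i + 1) st m

-- B's second pass: for i in range(len(text)): text.startswith('HPO(', i) is the take-4
-- test; `(i+3) in match` + `match[i+3]` is the single get? (some j ↔ membership).
def bScan : List Char → Nat → PySem.Dict Nat Nat → List String
  | [], _, _ => []
  | c :: rest, i, m =>
    if (c :: rest).take 4 = ['H', 'P', 'O', '('] then
      match m.get? (i + 3) with
      | some j =>
        String.ofList (((c :: rest).drop 4).take (j - (i + 4))) :: bScan rest (i + 1) m
      | none => bScan rest (i + 1) m
    else bScan rest (i + 1) m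

def extract_hpo_expressions_alt (text : String) : List String :=
  bScan text.toList 0 (buildAux text.toList 0 [] PySem.Dict.empty).2

-- ===== PRECONDITION & SPEC =====
def Spec_extract_hpo_expressions (text : String) (out : List String) : Prop := out = extract_hpo_expressions_alt text
instance (text : String) (out : List String) : Decidable (Spec_extract_hpo_expressions text out) := by unfold Spec_extract_hpo_expressions; infer_instance

-- ===== CLAIM (what is proved, stated in full; the proofs are below) =====
def Claim_equal_extract_hpo_expressions : Prop := ∀ (text : String), Dom_extract_hpo_expressions text → Spec_extract_hpo_expressions text (extract_hpo_expressions text)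

-- ===== LEMMAS AND PROOFS =====

-- a key below i and not on the stack is never touched again by the stack pass
theorem buildAux_stable : ∀ (l : List Char) (i : Nat) (st : List Nat)
    (m : PySem.Dict Nat Nat) (q : Nat), q < i → q ∉ st →
    ((buildAux l i st m).2).get? q = m.get? q := by
  intro l
  induction l with
  | nil => intro i st m q _ _; rfl
  | cons c rest ih =>
    intro i st m q hq hst
    unfold buildAux
    split
    · exact ih (i+1) (i :: st) m q (by omega) (by
        simp [hst]; omega)
    · split
      · match st, hst with
        | [], _ => exact ih (i+1) [] m q (by omega) (by simp)
        | x :: st', hst =>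
          have hx : q ≠ x := by simp at hst; tauto
          have hst' : q ∉ st' := by simp at hst; tauto
          rw [ih (i+1) st' (m.insert x i) q (by omega) hst']
          exact PySem.Dict.get?_insert_of_ne m i hx
      · exact ih (i+1) st m q (by omega) hst

-- stack entries and dict keys produced by the stack pass stay below the end index
theorem buildAux_bound : ∀ (l : List Char) (i : Nat) (st : List Nat)
    (m : PySem.Dict Nat Nat),
    (∀ x ∈ st, x < i) → (∀ k, i ≤ k → m.get? k = none) →
    (∀ x ∈ (buildAux l i st m).1, x < i + l.length) ∧
      (∀ k, i + l.length ≤ k → ((buildAux l i st m).2).get? k = none) := by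
  intro l
  induction l with
  | nil => intro i st m hst hm; simpa [buildAux] using ⟨hst, fun k hk => hm k hk⟩
  | cons c rest ih =>
    intro i st m hst hm
    unfold buildAux
    have harith : i + (c :: rest).length = (i + 1) + rest.length := by simp; omega
    split
    · have := ih (i+1) (i :: st) m
        (by intro x hx; simp at hx; rcases hx with h | h; omega; exact lt_trans (hst x h) (by omega))
        (fun k hk => hm k (by omega))
      constructor
      · intro x hx; have := this.1 x hx; omega
      · intro k hk; exact this.2 k (by omega)
    · split
      · match st, hst with
        | [], _ =>
          have := ih (i+1) [] m (by simp) (fun k hk => hm k (by omega))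
          exact ⟨fun x hx => by have := this.1 x hx; omega,
                 fun k hk => this.2 k (by omega)⟩
        | x :: st', hst =>
          have := ih (i+1) st' (m.insert x i)
            (by intro y hy; have := hst y (by simp [hy]); omega)
            (by intro k hk
                have hxk : k ≠ x := by have := hst x (by simp); omega
                rw [PySem.Dict.get?_insert_of_ne m i hxk]
                exact hm k (by omega))
          exact ⟨fun y hy => by have := this.1 y hy; omega,
                 fun k hk => this.2 k (by omega)⟩
      · have := ih (i+1) st m (fun x hx => by have := hst x hx; omega)
          (fun k hk => hm k (by omega))
        exact ⟨fun x hx => by have := this.1 x hx; omega,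
               fun k hk => this.2 k (by omega)⟩

theorem buildAux_append : ∀ (l₁ l₂ : List Char) (i : Nat) (st : List Nat)
    (m : PySem.Dict Nat Nat),
    buildAux (l₁ ++ l₂) i st m =
      buildAux l₂ (i + l₁.length) (buildAux l₁ i st m).1 (buildAux l₁ i st m).2 := by
  intro l₁
  induction l₁ with
  | nil => intro l₂ i st m; simp [buildAux]
  | cons c rest ih =>
    intro l₂ i st m
    have hlen : i + (c :: rest).length = (i + 1) + rest.length := by
      simp only [List.length_cons]; omega
    rw [List.cons_append, hlen]
    by_cases h1 : c = '('
    · have e1 : ∀ xs, buildAux (c :: xs) i st m = buildAux xs (i+1) (i::st) m := by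
        intro xs; simp only [buildAux]; rw [if_pos h1]
      rw [e1, e1, ih]
    · by_cases h2 : c = ')'
      · match st with
        | [] =>
          have e1 : ∀ xs, buildAux (c :: xs) i ([] : List Nat) m = buildAux xs (i+1) [] m := by
            intro xs; simp only [buildAux]; rw [if_neg h1, if_pos h2]
          rw [e1, e1, ih]
        | x :: st' =>
          have e1 : ∀ xs, buildAux (c :: xs) i (x :: st') m
              = buildAux xs (i+1) st' (m.insert x i) := by
            intro xs; simp only [buildAux]; rw [if_neg h1, if_pos h2]
          rw [e1, e1, ih]
      · have e1 : ∀ xs, buildAux (c :: xs) i st m = buildAux xs (i+1) st m := by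
          intro xs; simp only [buildAux]; rw [if_neg h1, if_neg h2]
        rw [e1, e1, ih]

-- CORE: with a = the stack entries above q, the stack pass records for q exactly the
-- index at which A's level scan (level = a.length) stops
theorem buildAux_core : ∀ (l : List Char) (i : Nat) (a b2 : List Nat)
    (m : PySem.Dict Nat Nat) (q : Nat),
    q < i → q ∉ a → q ∉ b2 → m.get? q = none →
    ((buildAux l i (a ++ q :: b2) m).2).get? q = scanClose l i a.length := by
  intro l
  induction l with
  | nil => intro i a b2 m q _ _ _ hm; simpa [buildAux, scanClose] using hm
  | cons c rest ih =>
    intro i a b2 m q hqi hqa hqb hm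
    simp only [buildAux, scanClose]
    by_cases h1 : c = '('
    · rw [if_pos h1, if_pos h1]
      have := ih (i+1) (i :: a) b2 m q (by omega)
        (by simp; exact ⟨by omega, hqa⟩) hqb hm
      simpa using this
    · rw [if_neg h1, if_neg h1]
      by_cases h2 : c = ')'
      · rw [if_pos h2, if_pos h2]
        match a, hqa with
        | [], _ =>
          simp only [List.nil_append, List.length_nil]
          rw [buildAux_stable rest (i+1) b2 (m.insert q i) q (by omega) hqb]
          simp [PySem.Dict.get?_insert_self]
        | x :: a', hqa =>
          have hxq : q ≠ x := by simp at hqa; tauto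
          have hqa' : q ∉ a' := by simp at hqa; tauto
          simp only [List.cons_append, List.length_cons]
          rw [if_neg (by omega)]
          have := ih (i+1) a' b2 (m.insert x i) q (by omega) hqa' hqb
            (by rw [PySem.Dict.get?_insert_of_ne m i hxq]; exact hm)
          simpa using this
      · rw [if_neg h2, if_neg h2]
        exact ih (i+1) a b2 m q (by omega) hqa hqb hm

theorem findHPOAux_spec : ∀ (l : List Char) (i p : Nat),
    findHPOAux l i = some p → ((l.drop (p - i)).take 4 = ['H', 'P', 'O', '(']) := by
  intro l
  induction l with
  | nil => intro i p h; simp [findHPOAux] at h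
  | cons c rest ih =>
    intro i p h
    unfold findHPOAux at h
    split at h
    · rename_i htake
      cases h
      simpa using htake
    · have hb := findHPOAux_bounds rest (i+1) p h
      have := ih (i+1) p h
      have hpi : p - i = (p - (i+1)) + 1 := by omega
      rw [hpi, List.drop_succ_cons]
      exact this

theorem bScan_nil_of_none : ∀ (l : List Char) (i : Nat) (m : PySem.Dict Nat Nat),
    findHPOAux l i = none → bScan l i m = [] := by
  intro l
  induction l with
  | nil => intro i m _; rfl
  | cons c rest ih =>
    intro i m h
    unfold findHPOAux at h
    split at h
    · exact absurd h (by simp)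
    · rename_i hne
      unfold bScan
      rw [if_neg hne]
      exact ih (i+1) m h

theorem bScan_skip : ∀ (l : List Char) (i p : Nat) (m : PySem.Dict Nat Nat),
    findHPOAux l i = some p → bScan l i m = bScan (l.drop (p - i)) p m := by
  intro l
  induction l with
  | nil => intro i p m h; simp [findHPOAux] at h
  | cons c rest ih =>
    intro i p m h
    unfold findHPOAux at h
    split at h
    · cases h
      simp
    · rename_i hne
      have hb := findHPOAux_bounds rest (i+1) p h
      simp only [bScan]
      rw [if_neg hne]
      rw [ih (i+1) p m h]
      have hpi : p - i = (p - (i+1)) + 1 := by omega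
      rw [hpi, List.drop_succ_cons]

theorem drop_decomp (cs : List Char) (p : Nat)
    (hp : (cs.drop p).take 4 = ['H', 'P', 'O', '(']) :
    cs.drop p = 'H' :: 'P' :: 'O' :: '(' :: cs.drop (p + 4) := by
  have h1 := (List.take_append_drop 4 (cs.drop p)).symm
  rw [hp] at h1
  rw [List.drop_drop] at h1
  simpa [Nat.add_comm] using h1

-- at an occurrence of 'HPO(' at p, the precomputed dict entry for the '(' at p+3 is
-- exactly what A's inner scan from p+4 finds
theorem get_full (cs : List Char) (p : Nat)
    (hp : (cs.drop p).take 4 = ['H', 'P', 'O', '(']) :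
    ((buildAux cs 0 [] PySem.Dict.empty).2).get? (p + 3) =
      scanClose (cs.drop (p + 4)) (p + 4) 0 := by
  have hlen4 : p + 4 ≤ cs.length := by
    have : ((cs.drop p).take 4).length = 4 := by rw [hp]; rfl
    rw [List.length_take, List.length_drop] at this
    omega
  have hdrop3 : cs.drop (p + 3) = '(' :: cs.drop (p + 4) := by
    have e : cs.drop (p + 3) = (cs.drop p).drop 3 := by
      rw [List.drop_drop]
    rw [e, drop_decomp cs p hp]
    rfl
  have hsplit : cs = cs.take (p + 3) ++ ('(' :: cs.drop (p + 4)) := by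
    conv_lhs => rw [← List.take_append_drop (p + 3) cs]
    rw [hdrop3]
  have hlen3 : (cs.take (p + 3)).length = p + 3 := by
    rw [List.length_take]; omega
  have hbound := buildAux_bound (cs.take (p + 3)) 0 [] PySem.Dict.empty
    (by simp) (by intro k _; simp [PySem.Dict.get?_empty])
  rw [hlen3] at hbound
  conv_lhs => rw [hsplit]
  rw [buildAux_append, hlen3]
  have hstep : buildAux ('(' :: cs.drop (p + 4)) (0 + (p + 3))
      (buildAux (cs.take (p + 3)) 0 [] PySem.Dict.empty).1
      (buildAux (cs.take (p + 3)) 0 [] PySem.Dict.empty).2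
      = buildAux (cs.drop (p + 4)) (p + 4)
        ([] ++ (p + 3) :: (buildAux (cs.take (p + 3)) 0 [] PySem.Dict.empty).1)
        (buildAux (cs.take (p + 3)) 0 [] PySem.Dict.empty).2 := by
    simp only [buildAux, if_true, List.nil_append]
    norm_num
  rw [hstep]
  rw [buildAux_core (cs.drop (p + 4)) (p + 4) []
    (buildAux (cs.take (p + 3)) 0 [] PySem.Dict.empty).1
    (buildAux (cs.take (p + 3)) 0 [] PySem.Dict.empty).2 (p + 3)
    (by omega) (by simp)
    (by intro hmem; have := hbound.1 _ hmem; omega)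
    (hbound.2 (p + 3) (by omega))]
  rfl

-- unfold bScan one step without letting simp recurse into the literal cons tail
theorem bScan_cons (c : Char) (rest : List Char) (i : Nat) (m : PySem.Dict Nat Nat) :
    bScan (c :: rest) i m =
      if (c :: rest).take 4 = ['H', 'P', 'O', '('] then
        match m.get? (i + 3) with
        | some j =>
          String.ofList (((c :: rest).drop 4).take (j - (i + 4))) :: bScan rest (i + 1) m
        | none => bScan rest (i + 1) m
      else bScan rest (i + 1) m := by
  simp only [bScan]

theorem main_loop (cs : List Char) : ∀ (s : Nat),
    aLoop cs s = bScan (cs.drop s) s (buildAux cs 0 [] PySem.Dict.empty).2 := by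
  have key : ∀ (n s : Nat), cs.length - s = n →
      aLoop cs s = bScan (cs.drop s) s (buildAux cs 0 [] PySem.Dict.empty).2 := by
    intro n
    induction n using Nat.strong_induction_on with
    | _ n ih =>
      intro s hn
      rw [aLoop.eq_def]
      split
      · rename_i hnone
        exact (bScan_nil_of_none _ _ _ hnone).symm
      · rename_i p h
        have hb := findHPOAux_bounds _ _ _ h
        rw [List.length_drop] at hb
        have hps : s + (p - s) = p := by omega
        have hocc : (cs.drop p).take 4 = ['H', 'P', 'O', '('] := by
          have := findHPOAux_spec _ _ _ h
          rwa [List.drop_drop, hps] at this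
        rw [bScan_skip _ _ _ _ h, List.drop_drop, hps]
        have hdrop := drop_decomp cs p hocc
        have htail : cs.drop (p + 1) = 'P' :: 'O' :: '(' :: cs.drop (p + 4) := by
          have e : cs.drop (p + 1) = (cs.drop p).drop 1 := by rw [List.drop_drop]
          rw [e, hdrop]
          rfl
        rw [hdrop, bScan_cons, if_pos (by simp), get_full cs p hocc]
        have hrec : aLoop cs (p + 1)
            = bScan (cs.drop (p + 1)) (p + 1) (buildAux cs 0 [] PySem.Dict.empty).2 :=
          ih (cs.length - (p + 1)) (by omega) (p + 1) rfl
        rw [htail] at hrec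
        cases hscan : scanClose (cs.drop (p + 4)) (p + 4) 0 with
        | none => exact hrec
        | some j =>
          rw [hrec]
          rfl
  intro s
  exact key (cs.length - s) s rfl

-- ===== VERDICT (by name: the statement is the Claim_ definition above) =====
theorem extract_hpo_expressions_spec : Claim_equal_extract_hpo_expressions := by
  intro text _
  unfold Spec_extract_hpo_expressions extract_hpo_expressions extract_hpo_expressions_alt
  simpa using main_loop text.toList 0
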